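-- pv_equiv track=rewrite | github.com/ander1023/info-auto | tools/cip.py | group_by_gap
-- ===== SOURCE A (Python) =====
-- def group_by_gap(ips_int, max_gap=8):
--     """按相邻IP差距≤8分组，超过则为独立IP"""
--     if not ips_int:
--         return [], []
--
--     groups = []
--     singles = []
--     current_group = [ips_int[0]]
--
--     for i in range(1, len(ips_int)):
--         ip = ips_int[i]
--         gap = ip - current_group[-1]
--         if gap <= max_gap:
--             current_group.append(ip)
--         else:
--             if len(current_group) == 1:
--                 singles.append(current_group[0])
--             else:
--                 groups.append(current_group)
--             current_group = [ip]
--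
--     # 处理最后一组
--     if len(current_group) == 1:
--         singles.append(current_group[0])
--     else:
--         groups.append(current_group)
--
--     return groups, singles
-- ===== SOURCE B (Python) =====
-- def group_by_gap(ips_int, max_gap=8):
--     """按相邻IP差距≤8分组，超过则为独立IP"""
--     if not ips_int:
--         return [], []
--     n = len(ips_int)
--     cuts = [0] + [i for i in range(1, n) if ips_int[i] - ips_int[i - 1] > max_gap] + [n]
--     groups = []
--     singles = []
--     for a, b in zip(cuts, cuts[1:]):
--         if b - a == 1:
--             singles.append(ips_int[a])
--         else:
--             groups.append(ips_int[a:b])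
--     return groups, singles
-- ===== Notes on version B (the rewrite author's own statement) =====
-- stated objective: alternative
-- what changed: B replaces A's incremental run-accumulation loop (mutable current_group flushed into groups/singles) by index arithmetic: it first computes the list of cut positions where the gap exceeds max_gap, then materialises each maximal run as a slice ips_int[a:b] between consecutive cuts, classifying by the cut distance b-a.
import Mathlib
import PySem

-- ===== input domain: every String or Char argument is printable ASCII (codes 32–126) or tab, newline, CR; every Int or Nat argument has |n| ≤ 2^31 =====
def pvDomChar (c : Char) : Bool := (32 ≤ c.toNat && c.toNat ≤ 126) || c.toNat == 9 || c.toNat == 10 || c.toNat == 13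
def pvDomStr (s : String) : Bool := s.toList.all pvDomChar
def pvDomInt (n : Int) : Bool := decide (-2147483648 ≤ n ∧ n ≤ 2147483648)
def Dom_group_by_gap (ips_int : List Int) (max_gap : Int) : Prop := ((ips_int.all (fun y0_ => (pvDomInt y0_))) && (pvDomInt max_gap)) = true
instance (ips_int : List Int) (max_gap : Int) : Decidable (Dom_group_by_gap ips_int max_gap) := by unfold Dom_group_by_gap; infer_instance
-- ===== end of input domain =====

-- B replaces A's incremental run-accumulation loop by index arithmetic: it computes the cut
-- positions where the gap exceeds max_gap, then slices each run out of ips_int between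
-- consecutive cuts (objective: alternative algorithmic decomposition, same cost).

-- ===== PORT A =====
-- loop body: state (groups, singles, current_group); current_group is always nonempty,
-- so current_group[-1] is ported as getLastD 0 and current_group[0] as headD 0.
def pvStepA (max_gap : Int) (st : List (List Int) × List Int × List Int) (ip : Int) :
    List (List Int) × List Int × List Int :=
  let (groups, singles, cur) := st
  let gap := ip - cur.getLastD 0
  if gap ≤ max_gap then (groups, singles, cur ++ [ip])
  else if cur.length = 1 then (groups, singles ++ [cur.headD 0], [ip])
  else (groups ++ [cur], singles, [ip])

def group_by_gap (ips_int : List Int) (max_gap : Int) : List (List Int) × List Int :=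
  match ips_int with
  | [] => ([], [])
  | x :: rest =>
    -- for i in range(1, len(ips_int)): fold over the tail
    let (groups, singles, cur) := rest.foldl (pvStepA max_gap) ([], [], [x])
    -- final group
    if cur.length = 1 then (groups, singles ++ [cur.headD 0]) else (groups ++ [cur], singles)

-- ===== PORT B =====
-- ips_int[i] for i in range(1,n) (always in range) is ported as pyGetD _ _ 0 (exact there).
def pvCond (ips : List Int) (m : Int) (i : Int) : Bool :=
  decide (m < PySem.List.pyGetD ips i 0 - PySem.List.pyGetD ips (i - 1) 0)

-- cuts = [0] + [i for i in range(1, n) if ips_int[i] - ips_int[i-1] > max_gap] + [n]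
def pvCuts (ips : List Int) (m : Int) : List Int :=
  [0] ++ (PySem.List.pyRange 1 (ips.length : Int) 1).filter (pvCond ips m)
    ++ [(ips.length : Int)]

-- loop body over the zipped cut pairs (a, b)
def pvStepB (ips : List Int) (st : List (List Int) × List Int) (ab : Int × Int) :
    List (List Int) × List Int :=
  if ab.2 - ab.1 = 1 then (st.1, st.2 ++ [PySem.List.pyGetD ips ab.1 0])
  else (st.1 ++ [PySem.List.slice ips (some ab.1) (some ab.2)], st.2)

def group_by_gap_alt (ips_int : List Int) (max_gap : Int) : List (List Int) × List Int :=
  match ips_int with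
  | [] => ([], [])
  | _ :: _ =>
    let cuts := pvCuts ips_int max_gap
    -- zip(cuts, cuts[1:]); cuts[1:] is slice cuts (some 1) none
    (cuts.zip (PySem.List.slice cuts (some 1) none)).foldl (pvStepB ips_int) ([], [])

-- ===== PRECONDITION & SPEC =====
def Spec_group_by_gap (ips_int : List Int) (max_gap : Int) (out : List (List Int) × List Int) : Prop := out = group_by_gap_alt ips_int max_gap
instance (ips_int : List Int) (max_gap : Int) (out : List (List Int) × List Int) : Decidable (Spec_group_by_gap ips_int max_gap out) := by unfold Spec_group_by_gap; infer_instance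

-- ===== CLAIM (what is proved, stated in full; the proofs are below) =====
def Claim_equal_group_by_gap : Prop := ∀ (ips_int : List Int) (max_gap : Int), Dom_group_by_gap ips_int max_gap → Spec_group_by_gap ips_int max_gap (group_by_gap ips_int max_gap)

-- ===== LEMMAS AND PROOFS =====

/-- Length of the maximal run continuing after previous element `prev`. -/
def pvRunLen (m prev : Int) : List Int → Nat
  | [] => 0
  | x :: t => if x - prev ≤ m then pvRunLen m x t + 1 else 0

/-- Reference segmentation of the input into maximal runs. -/
def pvSpecRuns (m : Int) : List Int → List (List Int)
  | [] => []
  | x :: t => (x :: t.take (pvRunLen m x t)) :: pvSpecRuns m (t.drop (pvRunLen m x t))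
  termination_by xs => xs.length
  decreasing_by simp

theorem pvSpecRuns_nil (m : Int) : pvSpecRuns m [] = [] := by rw [pvSpecRuns.eq_def]

theorem pvSpecRuns_cons (m x : Int) (t : List Int) :
    pvSpecRuns m (x :: t) =
      (x :: t.take (pvRunLen m x t)) :: pvSpecRuns m (t.drop (pvRunLen m x t)) := by
  rw [pvSpecRuns.eq_def]

/-- Classification of a run list into (groups, singles). -/
def pvClassify (runs : List (List Int)) : List (List Int) × List Int :=
  (runs.filter (fun r => 1 < r.length),
   (runs.filter (fun r => r.length = 1)).map (fun r => r.headD 0))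

/-- A's final-flush step, as a function of the loop state. -/
def pvFinal (st : List (List Int) × List Int × List Int) : List (List Int) × List Int :=
  let (groups, singles, cur) := st
  if cur.length = 1 then (groups, singles ++ [cur.headD 0]) else (groups ++ [cur], singles)

theorem pvClassify_cons (r : List Int) (rs : List (List Int)) :
    pvClassify (r :: rs) =
      ((if 1 < r.length then r :: (pvClassify rs).1 else (pvClassify rs).1),
       (if r.length = 1 then r.headD 0 :: (pvClassify rs).2 else (pvClassify rs).2)) := by
  simp only [pvClassify, List.filter_cons]
  split_ifs with h1 h2 h2 <;> simp_all

theorem pvRunLen_le (m prev : Int) (t : List Int) : pvRunLen m prev t ≤ t.length := by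
  induction t generalizing prev with
  | nil => simp [pvRunLen]
  | cons x t ih => simp only [pvRunLen]; split <;> simp [Nat.succ_le_succ (ih x)]

theorem pvFoldA_append (m : Int) (rest : List Int) (g0 : List (List Int)) (s0 : List Int)
    (g : List (List Int)) (s cur : List Int) :
    rest.foldl (pvStepA m) (g0 ++ g, s0 ++ s, cur) =
      (g0 ++ (rest.foldl (pvStepA m) (g, s, cur)).1,
       s0 ++ (rest.foldl (pvStepA m) (g, s, cur)).2.1,
       (rest.foldl (pvStepA m) (g, s, cur)).2.2) := by
  induction rest generalizing g s cur with
  | nil => rfl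
  | cons ip rest ih =>
    simp only [List.foldl_cons, pvStepA]
    split_ifs with h1 h2
    · exact ih g s (cur ++ [ip])
    · have := ih g (s ++ [cur.headD 0]) [ip]
      simpa [List.append_assoc] using this
    · have := ih (g ++ [cur]) s [ip]
      simpa [List.append_assoc] using this

theorem pvFinal_prepend (g0 : List (List Int)) (s0 : List Int) (g : List (List Int))
    (s cur : List Int) :
    pvFinal (g0 ++ g, s0 ++ s, cur) =
      (g0 ++ (pvFinal (g, s, cur)).1, s0 ++ (pvFinal (g, s, cur)).2) := by
  simp only [pvFinal]
  split_ifs <;> simp [List.append_assoc]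

/-- A's loop-then-flush equals classifying the runs, generalized over the current run. -/
theorem pvCoreA (m : Int) (xs : List Int) : ∀ (cur : List Int), cur ≠ [] →
    pvFinal (xs.foldl (pvStepA m) ([], [], cur)) =
      pvClassify ((cur ++ xs.take (pvRunLen m (cur.getLastD 0) xs)) ::
        pvSpecRuns m (xs.drop (pvRunLen m (cur.getLastD 0) xs))) := by
  induction xs with
  | nil =>
    intro cur h
    match cur, h with
    | c :: cs, _ =>
      cases cs <;> simp [pvFinal, pvClassify, pvRunLen, pvSpecRuns_nil, List.filter]
  | cons ip xs ih =>
    intro cur h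
    simp only [List.getLastD_eq_getLast?] at ih ⊢
    simp only [List.foldl_cons]
    by_cases hg : ip - cur.getLast?.getD 0 ≤ m
    · have hA : pvStepA m ([], [], cur) ip = ([], [], cur ++ [ip]) := by
        simp [pvStepA, hg]
      have hr : pvRunLen m (cur.getLast?.getD 0) (ip :: xs) = pvRunLen m ip xs + 1 := by
        simp [pvRunLen, hg]
      rw [hA, hr]
      have ihx := ih (cur ++ [ip]) (by simp)
      simp only [List.getLast?_concat, Option.getD_some] at ihx
      rw [ihx]
      simp [List.take_succ_cons, List.drop_succ_cons, List.append_assoc]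
    · have hr : pvRunLen m (cur.getLast?.getD 0) (ip :: xs) = 0 := by
        simp [pvRunLen]; omega
      rw [hr]
      simp only [List.take_zero, List.drop_zero, List.append_nil]
      have hrec := ih [ip] (by simp)
      simp only [show (([ip] : List Int).getLast?.getD 0) = ip from rfl,
        List.singleton_append] at hrec
      by_cases hl : cur.length = 1
      · have hA : pvStepA m ([], [], cur) ip = (([] : List (List Int)) ++ [],
            [cur.headD 0] ++ ([] : List Int), [ip]) := by
          simp [pvStepA, hg, hl]
        rw [hA, pvFoldA_append m xs [] [cur.headD 0] [] [] [ip]]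
        rw [pvFinal_prepend, hrec, pvSpecRuns_cons, pvClassify_cons (r := cur)]
        simp [hl]
      · have hA : pvStepA m ([], [], cur) ip = ([cur] ++ ([] : List (List Int)),
            ([] : List Int) ++ [], [ip]) := by
          simp [pvStepA, hg, hl]
        rw [hA, pvFoldA_append m xs [cur] [] [] [] [ip]]
        have hlen : 1 < cur.length := by
          have : cur.length ≠ 0 := by simpa using h
          omega
        rw [pvFinal_prepend, hrec, pvSpecRuns_cons, pvClassify_cons (r := cur)]
        simp [hl, hlen]

-- ---------- B side ----------

/-- Suffix cut list starting at position p. -/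
def pvCutsFrom (ips : List Int) (m : Int) (p : Nat) : List Int :=
  (p : Int) :: (PySem.List.pyRange ((p : Int) + 1) (ips.length : Int) 1).filter (pvCond ips m)
    ++ [(ips.length : Int)]

theorem pvRunLen_shift (ips : List Int) (m : Int) (p : Nat) (hp : p + 1 < ips.length) :
    pvRunLen m (ips.getD p 0) (ips.drop (p + 1)) =
      if ips.getD (p + 1) 0 - ips.getD p 0 ≤ m then
        pvRunLen m (ips.getD (p + 1) 0) (ips.drop (p + 2)) + 1
      else 0 := by
  rw [List.drop_eq_getElem_cons hp]
  simp [pvRunLen, List.getD, List.getElem?_eq_getElem hp]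

theorem pvCond_natCast (ips : List Int) (m : Int) (p : Nat) :
    pvCond ips m ((p + 1 : Nat) : Int) =
      decide (m < ips.getD (p + 1) 0 - ips.getD p 0) := by
  simp only [pvCond]
  have h1 : ((p + 1 : Nat) : Int) - 1 = ((p : Nat) : Int) := by push_cast; ring
  rw [h1, PySem.List.pyGetD_natCast, PySem.List.pyGetD_natCast]

/-- Inside a run there is no cut. -/
theorem pvNoBreak (ips : List Int) (m : Int) : ∀ (j p : Nat), p < ips.length →
    j < pvRunLen m (ips.getD p 0) (ips.drop (p + 1)) →
    pvCond ips m ((p : Int) + 1 + (j : Int)) = false := by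
  intro j
  induction j with
  | zero =>
    intro p hp hj
    have hp1 : p + 1 < ips.length := by
      by_contra hc
      rw [List.drop_eq_nil_of_le (by omega)] at hj
      simp [pvRunLen] at hj
    rw [pvRunLen_shift ips m p hp1] at hj
    have hidx : ((p : Int) + 1 + ((0 : Nat) : Int)) = ((p + 1 : Nat) : Int) := by
      push_cast; ring
    rw [hidx, pvCond_natCast ips m p]
    by_cases hle : ips.getD (p + 1) 0 - ips.getD p 0 ≤ m
    · simp only [decide_eq_false_iff_not]
      omega
    · rw [if_neg hle] at hj
      omega
  | succ j ihj =>
    intro p hp hj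
    have hp1 : p + 1 < ips.length := by
      by_contra hc
      rw [List.drop_eq_nil_of_le (by omega)] at hj
      simp [pvRunLen] at hj
    rw [pvRunLen_shift ips m p hp1] at hj
    by_cases hle : ips.getD (p + 1) 0 - ips.getD p 0 ≤ m
    · rw [if_pos hle] at hj
      have hrec := ihj (p + 1) hp1 (Nat.lt_of_succ_lt_succ hj)
      have hidx : ((p : Int) + 1 + ((j + 1 : Nat) : Int)) =
          (((p + 1 : Nat) : Int) + 1 + ((j : Nat) : Int)) := by push_cast; ring
      rw [hidx]
      exact hrec
    · rw [if_neg hle] at hj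
      omega

/-- At the end of a run (if not at the end of the list) there is a cut. -/
theorem pvBreak (ips : List Int) (m : Int) : ∀ (r p : Nat), p < ips.length →
    pvRunLen m (ips.getD p 0) (ips.drop (p + 1)) = r → p + 1 + r < ips.length →
    pvCond ips m ((p : Int) + 1 + (r : Int)) = true := by
  intro r
  induction r with
  | zero =>
    intro p hp hr hlt
    have hp1 : p + 1 < ips.length := hlt
    rw [pvRunLen_shift ips m p hp1] at hr
    by_cases hle : ips.getD (p + 1) 0 - ips.getD p 0 ≤ m
    · rw [if_pos hle] at hr
      omega
    · have hidx : ((p : Int) + 1 + ((0 : Nat) : Int)) = ((p + 1 : Nat) : Int) := by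
        push_cast; ring
      rw [hidx, pvCond_natCast ips m p]
      simp only [decide_eq_true_eq]
      omega
  | succ r ihr =>
    intro p hp hr hlt
    have hp1 : p + 1 < ips.length := by omega
    rw [pvRunLen_shift ips m p hp1] at hr
    by_cases hle : ips.getD (p + 1) 0 - ips.getD p 0 ≤ m
    · rw [if_pos hle] at hr
      have hr' : pvRunLen m (ips.getD (p + 1) 0) (ips.drop (p + 1 + 1)) = r :=
        Nat.succ_injective hr
      have hrec := ihr (p + 1) hp1 hr' (by omega)
      have hidx : ((p : Int) + 1 + ((r + 1 : Nat) : Int)) =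
          (((p + 1 : Nat) : Int) + 1 + ((r : Nat) : Int)) := by push_cast; ring
      rw [hidx]
      exact hrec
    · rw [if_neg hle] at hr
      omega

/-- The filtered range of cut candidates after p starts exactly at the end of p's run. -/
theorem pvFilterStruct (ips : List Int) (m : Int) (p : Nat) (hp : p < ips.length)
    (r : Nat) (hr : pvRunLen m (ips.getD p 0) (ips.drop (p + 1)) = r) :
    (PySem.List.pyRange ((p : Int) + 1) (ips.length : Int) 1).filter (pvCond ips m) =
      if p + 1 + r = ips.length then []
      else ((p + 1 + r : Nat) : Int) ::
        (PySem.List.pyRange (((p + 1 + r : Nat) : Int) + 1) (ips.length : Int) 1).filter (pvCond ips m) := by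
  have hrle : r ≤ ips.length - (p + 1) := by
    have := pvRunLen_le m (ips.getD p 0) (ips.drop (p + 1))
    rw [hr, List.length_drop] at this
    omega
  have hsplit : PySem.List.pyRange ((p : Int) + 1) (ips.length : Int) 1 =
      PySem.List.pyRange ((p : Int) + 1) ((p + 1 + r : Nat) : Int) 1 ++
      PySem.List.pyRange ((p + 1 + r : Nat) : Int) (ips.length : Int) 1 := by
    apply PySem.List.pyRange_one_append
    · push_cast; omega
    · push_cast; omega
  rw [hsplit, List.filter_append]
  have hfirst : (PySem.List.pyRange ((p : Int) + 1) ((p + 1 + r : Nat) : Int) 1).filter (pvCond ips m) = [] := by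
    rw [List.filter_eq_nil_iff]
    intro x hx
    rw [PySem.List.mem_pyRange_one] at hx
    have hj : ∃ j : Nat, x = (p : Int) + 1 + (j : Int) ∧ j < r := by
      refine ⟨(x - (p : Int) - 1).toNat, ?_, ?_⟩ <;> push_cast at hx ⊢ <;> omega
    obtain ⟨j, hxe, hjr⟩ := hj
    rw [hxe]
    simp [pvNoBreak ips m j p hp (by omega)]
  rw [hfirst, List.nil_append]
  by_cases hend : p + 1 + r = ips.length
  · rw [if_pos hend]
    rw [PySem.List.pyRange_one_eq_nil (by rw [hend])]
    simp
  · rw [if_neg hend]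
    have hlt : p + 1 + r < ips.length := by omega
    have hcut : pvCond ips m ((p + 1 + r : Nat) : Int) = true := by
      have := pvBreak ips m r p hp hr hlt
      have harith : ((p : Int) + 1 + (r : Int)) = ((p + 1 + r : Nat) : Int) := by push_cast; ring
      rwa [harith] at this
    rw [PySem.List.pyRange_one_cons (by push_cast; omega), List.filter_cons, hcut]
    simp

/-- B's fold over the suffix cut list equals classifying the runs of the suffix. -/
theorem pvCoreB (ips : List Int) (m : Int) : ∀ (fuel p : Nat) (g : List (List Int)) (s : List Int),
    ips.length - p ≤ fuel → p < ips.length →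
    ((pvCutsFrom ips m p).zip (pvCutsFrom ips m p).tail).foldl (pvStepB ips) (g, s) =
      (g ++ (pvClassify (pvSpecRuns m (ips.drop p))).1,
       s ++ (pvClassify (pvSpecRuns m (ips.drop p))).2) := by
  intro fuel
  induction fuel with
  | zero => intro p g s hf hp; omega
  | succ fuel ih =>
    intro p g s hf hp
    set r := pvRunLen m (ips.getD p 0) (ips.drop (p + 1)) with hrdef
    have hdropP : ips.drop p = ips.getD p 0 :: ips.drop (p + 1) := by
      rw [List.drop_eq_getElem_cons hp]
      simp [List.getD, List.getElem?_eq_getElem hp]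
    have hrle : r ≤ ips.length - (p + 1) := by
      have := pvRunLen_le m (ips.getD p 0) (ips.drop (p + 1))
      rw [List.length_drop] at this
      omega
    have hspec : pvSpecRuns m (ips.drop p) =
        (ips.getD p 0 :: (ips.drop (p + 1)).take r) ::
          pvSpecRuns m ((ips.drop (p + 1)).drop r) := by
      rw [hdropP]
      exact pvSpecRuns_cons m _ _
    have hdrop2 : (ips.drop (p + 1)).drop r = ips.drop (p + 1 + r) := by
      rw [List.drop_drop]
    have hrunlen : (ips.getD p 0 :: (ips.drop (p + 1)).take r).length = r + 1 := by
      simp [List.length_take]; omega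
    have hslice : PySem.List.slice ips (some ((p : Nat) : Int)) (some ((p + 1 + r : Nat) : Int)) =
        ips.getD p 0 :: (ips.drop (p + 1)).take r := by
      rw [PySem.List.slice_natCast]
      have : p + 1 + r - p = r + 1 := by omega
      rw [this, hdropP]
      simp [List.take_succ_cons]
    have hfilt := pvFilterStruct ips m p hp r hrdef.symm
    by_cases hend : p + 1 + r = ips.length
    · -- last run: cuts are [p, n]
      have hcuts : pvCutsFrom ips m p = [(p : Int), (ips.length : Int)] := by
        rw [pvCutsFrom, hfilt, if_pos hend]; rfl
      rw [hcuts]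
      have hzip : ([(p : Int), (ips.length : Int)]).zip ([(p : Int), (ips.length : Int)]).tail =
          [((p : Int), (ips.length : Int))] := rfl
      rw [hzip]
      have hdropEnd : pvSpecRuns m ((ips.drop (p + 1)).drop r) = [] := by
        rw [hdrop2, hend, List.drop_length, pvSpecRuns_nil]
      simp only [List.foldl_cons, List.foldl_nil, pvStepB]
      by_cases hr1 : (ips.length : Int) - (p : Int) = 1
      · -- single
        have hr0 : r = 0 := by omega
        rw [if_pos hr1, hspec, hdropEnd, pvClassify_cons]
        simp [pvClassify, hr0, PySem.List.pyGetD_natCast]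
      · have hr0 : r ≠ 0 := by omega
        rw [if_neg hr1, hspec, hdropEnd, pvClassify_cons]
        have : ((ips.length : Nat) : Int) = ((p + 1 + r : Nat) : Int) := by rw [hend]
        rw [this, hslice]
        simp [pvClassify, hr0]
        omega
    · -- run followed by more: cuts = p :: cutsFrom (p+1+r)
      have hq : p + 1 + r < ips.length := by omega
      have hcuts : pvCutsFrom ips m p = (p : Int) :: pvCutsFrom ips m (p + 1 + r) := by
        rw [pvCutsFrom, hfilt, if_neg hend, pvCutsFrom]
        simp
      have hne : pvCutsFrom ips m (p + 1 + r) ≠ [] := by rw [pvCutsFrom]; simp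
      obtain ⟨c, cs, hcs⟩ := List.exists_cons_of_ne_nil hne
      have hc : c = ((p + 1 + r : Nat) : Int) := by
        have := hcs
        rw [pvCutsFrom] at this
        exact (List.cons.injEq _ _ _ _ ▸ this).1.symm
      rw [hcuts, hcs]
      have hzip : ((p : Int) :: c :: cs).zip ((p : Int) :: c :: cs).tail =
          ((p : Int), c) :: (c :: cs).zip (c :: cs).tail := rfl
      rw [hzip, List.foldl_cons]
      rw [hspec, pvClassify_cons]
      have hstep : pvStepB ips (g, s) ((p : Int), c) =
          if r = 0 then (g, s ++ [ips.getD p 0]) else (g ++ [ips.getD p 0 :: (ips.drop (p + 1)).take r], s) := by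
        rw [pvStepB, hc]
        by_cases hr0 : r = 0
        · have : ((p + 1 + r : Nat) : Int) - (p : Int) = 1 := by push_cast; omega
          rw [if_pos this, if_pos hr0]
          simp [PySem.List.pyGetD_natCast]
        · have : ¬ ((p + 1 + r : Nat) : Int) - (p : Int) = 1 := by push_cast; omega
          rw [if_neg this, if_neg hr0, hslice]
      have hrec := ih (p + 1 + r) (if r = 0 then g else g ++ [ips.getD p 0 :: (ips.drop (p + 1)).take r])
        (if r = 0 then s ++ [ips.getD p 0] else s) (by omega) hq
      rw [← hcs] at hzip
      rw [hstep]
      by_cases hr0 : r = 0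
      · rw [if_pos hr0]
        rw [hcs] at hrec
        simp only [if_pos hr0] at hrec
        rw [hrec, hdrop2]
        have hl1 : (ips.getD p 0 :: (ips.drop (p + 1)).take r).length = 1 := by omega
        simp [hr0, List.append_assoc]
      · rw [if_neg hr0]
        rw [hcs] at hrec
        simp only [if_neg hr0] at hrec
        rw [hrec, hdrop2]
        simp [List.append_assoc]
        omega

-- ===== VERDICT (by name: the statement is the Claim_ definition above) =====
theorem group_by_gap_spec : Claim_equal_group_by_gap := by
  intro ips_int max_gap _
  unfold Spec_group_by_gap
  match ips_int with
  | [] => rfl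
  | x :: rest =>
    show group_by_gap (x :: rest) max_gap = group_by_gap_alt (x :: rest) max_gap
    -- A side
    have hA := pvCoreA max_gap rest [x] (by simp)
    rw [show (([x] : List Int).getLastD 0) = x from rfl, List.singleton_append,
      ← pvSpecRuns_cons] at hA
    -- B side
    have hcuts : pvCuts (x :: rest) max_gap = pvCutsFrom (x :: rest) max_gap 0 := by
      rw [pvCuts, pvCutsFrom]
      norm_num
    have hB := pvCoreB (x :: rest) max_gap (x :: rest).length 0 [] [] (by omega) (by simp)
    simp only [List.drop_zero, List.nil_append] at hB
    rcases hfold : rest.foldl (pvStepA max_gap) ([], [], [x]) with ⟨g1, s1, c1⟩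
    rw [hfold] at hA
    simp only [group_by_gap, group_by_gap_alt]
    rw [PySem.List.slice_from_one, hcuts, hB, hfold]
    rw [show ((pvClassify (pvSpecRuns max_gap (x :: rest))).1,
        (pvClassify (pvSpecRuns max_gap (x :: rest))).2) =
        pvClassify (pvSpecRuns max_gap (x :: rest)) from rfl, ← hA]
    rfl
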